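-- pv_equiv track=rewrite | github.com/y3ll0ww/V101 | api_fundamentals/views.py | first_letter_capital
-- ===== SOURCE A (Python) =====
-- def first_letter_capital(string):
--     str_list = list(string)
--     str_list[0] = str_list[0].upper()
--
--     forcount = 0
--     for character in str_list:
--         if character in [' ', '!', '-']:
--             try:
--                 str_list[forcount+1] = str_list[forcount+1].upper()
--             except:
--                 continue
--         forcount += 1
--
--     return ''.join(str_list)
-- ===== SOURCE B (Python) =====
-- def first_letter_capital(string):
--     # Staged split/join: for each separator, split the string on it,
--     # capitalize the first character of every piece, and rejoin with the
--     # separator. The first piece's first char is string[0], so the overall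
--     # first letter is capitalized too. Returns "" on "" (A raises there).
--     for sep in (' ', '!', '-'):
--         string = sep.join(p[:1].upper() + p[1:] for p in string.split(sep))
--     return string
-- ===== Notes on version B (the rewrite author's own statement) =====
-- stated objective: alternative
-- what changed: Replaces A's single in-place mutating pass (manual counter, look-ahead write, try/except) by three staged passes, one per separator: split the string on that separator, capitalize the first character of every piece, and rejoin; the per-character Python loop disappears into C-level str.split/str.join.
import Mathlib
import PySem

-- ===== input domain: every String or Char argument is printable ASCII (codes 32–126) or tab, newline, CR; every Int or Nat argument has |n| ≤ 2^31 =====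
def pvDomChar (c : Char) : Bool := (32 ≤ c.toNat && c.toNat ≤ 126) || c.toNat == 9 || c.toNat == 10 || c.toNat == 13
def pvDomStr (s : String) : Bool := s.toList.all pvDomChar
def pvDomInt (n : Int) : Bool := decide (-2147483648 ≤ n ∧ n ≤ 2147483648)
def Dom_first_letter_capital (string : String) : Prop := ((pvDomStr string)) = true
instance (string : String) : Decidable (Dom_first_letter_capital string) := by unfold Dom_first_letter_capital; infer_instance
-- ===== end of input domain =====

-- B replaces A's single in-place mutating pass (counter + try/except) by three staged
-- split/capitalize/join passes, one per separator: a different decomposition of the task.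

-- ===== PORT A =====
-- the for-loop over the live (mutated) list, with forcount and the try/except:
-- reading lst[i] each step sees earlier in-place writes, as Python's iterator does;
-- the except-branch's `continue` skips the forcount increment.
def fl_loopA (lst : List Char) (i forcount : Nat) : List Char :=
  if h : i < lst.length then
    if lst[i] == ' ' || lst[i] == '!' || lst[i] == '-' then
      if hf : forcount + 1 < lst.length then
        fl_loopA (lst.set (forcount + 1) (PySem.Chars.upperChar lst[forcount + 1])) (i + 1) (forcount + 1)
      else
        fl_loopA lst (i + 1) forcount
    else
      fl_loopA lst (i + 1) (forcount + 1)
  else lst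
termination_by lst.length - i
decreasing_by
  · simp only [List.length_set]; omega
  · omega
  · omega

def first_letter_capital (string : String) : String :=
  match string.toList with
  | [] => ""   -- Python raises IndexError at str_list[0]; excluded by Pre_
  | c :: rest => String.ofList (fl_loopA (PySem.Chars.upperChar c :: rest) 0 0)

-- ===== PORT B =====
-- p[:1].upper() + p[1:]  (for ASCII, upper of a one-char slice is upperChar of that char)
def flCap1 (p : List Char) : List Char :=
  match p with
  | [] => []
  | a :: t => PySem.Chars.upperChar a :: t

-- hand port of str.split(sep) for a single-char sep, exact: "".split(sep) = [""],
-- a leading sep yields an empty first piece, consecutive seps empty pieces.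
def flSplit1 (c : Char) : List Char → List (List Char)
  | [] => [[]]
  | a :: t =>
      match flSplit1 c t with
      | [] => [[]]   -- unreachable: flSplit1 never returns []
      | p :: ps => if a == c then [] :: p :: ps else (a :: p) :: ps

-- hand port of sep.join(parts) for a single-char sep, exact
def flJoin1 (c : Char) : List (List Char) → List Char
  | [] => []
  | [p] => p
  | p :: q :: r => p ++ c :: flJoin1 c (q :: r)

-- one iteration of B's for-loop: sep.join(p[:1].upper() + p[1:] for p in string.split(sep))
def flStage (c : Char) (l : List Char) : List Char :=
  flJoin1 c ((flSplit1 c l).map flCap1)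

def first_letter_capital_alt (string : String) : String :=
  String.ofList ([' ', '!', '-'].foldl (fun s sep => flStage sep s) string.toList)

-- ===== PRECONDITION & SPEC =====
-- Pre_ excludes exactly the empty string, on which A raises IndexError (B returns "" there).
def Pre_first_letter_capital (string : String) : Prop := string ≠ ""
instance (string : String) : Decidable (Pre_first_letter_capital string) := by unfold Pre_first_letter_capital; infer_instance
def pvWitness_first_letter_capital : String := "hello world! nice-day"

def Spec_first_letter_capital (string : String) (out : String) : Prop := out = first_letter_capital_alt string
instance (string : String) (out : String) : Decidable (Spec_first_letter_capital string out) := by unfold Spec_first_letter_capital; infer_instance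

-- ===== CLAIM (what is proved, stated in full; the proofs are below) =====
def Claim_equal_first_letter_capital : Prop := ∀ (string : String), Dom_first_letter_capital string → Pre_first_letter_capital string → Spec_first_letter_capital string (first_letter_capital string)

-- ===== LEMMAS AND PROOFS =====

-- abbreviation used throughout the proofs
def flU (c : Char) : Char := PySem.Chars.upperChar c

-- the combined separator test of A
def flSep (c : Char) : Bool := c == ' ' || c == '!' || c == '-'

-- look-behind step for the combined test / for a single separator
def fl_capAfter (prev cur : Char) : Char := if flSep prev then flU cur else cur
def flG (c prev cur : Char) : Char := if prev == c then flU cur else cur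

-- canonical zip forms: look-behind pass (head untouched) for one sep / for all three
def flTz (c : Char) (l : List Char) : List Char :=
  match l with
  | [] => []
  | h :: t => h :: List.zipWith (flG c) (h :: t) t

def flTall (l : List Char) : List Char :=
  match l with
  | [] => []
  | h :: t => h :: List.zipWith fl_capAfter (h :: t) t

-- basic facts about upperChar
theorem flSep_toNat {c : Char} (h : flSep c = true) :
    c.toNat = 32 ∨ c.toNat = 33 ∨ c.toNat = 45 := by
  unfold flSep at h
  simp only [Bool.or_eq_true, beq_iff_eq] at h
  rcases h with (h | h) | h <;> subst h <;> decide

theorem flSep_cases {c : Char} (h : flSep c = true) : c = ' ' ∨ c = '!' ∨ c = '-' := by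
  unfold flSep at h
  simp only [Bool.or_eq_true, beq_iff_eq] at h
  tauto

theorem flU_lower {x : Char} (h : PySem.Chars.islower x = true) :
    flU x = Char.ofNat (x.toNat - 32) ∧ 97 ≤ x.toNat ∧ x.toNat ≤ 122 := by
  unfold PySem.Chars.islower at h
  simp only [Bool.and_eq_true, decide_eq_true_eq] at h
  refine ⟨?_, h.1, h.2⟩
  unfold flU PySem.Chars.upperChar PySem.Chars.islower
  rw [if_pos (by simp only [Bool.and_eq_true, decide_eq_true_eq]; exact h)]

theorem flU_not_lower {x : Char} (h : PySem.Chars.islower x = false) : flU x = x := by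
  unfold flU PySem.Chars.upperChar
  rw [if_neg (by rw [h]; exact Bool.false_ne_true)]

theorem flU_idem (x : Char) : flU (flU x) = flU x := by
  by_cases h : PySem.Chars.islower x = true
  · obtain ⟨he, h1, h2⟩ := flU_lower h
    rw [he]
    obtain ⟨n, hn1, hn2, hne⟩ : ∃ n, 65 ≤ n ∧ n ≤ 90 ∧ x.toNat - 32 = n :=
      ⟨x.toNat - 32, by omega, by omega, rfl⟩
    rw [hne]
    interval_cases n <;> decide
  · have hx : PySem.Chars.islower x = false := by
      cases e : PySem.Chars.islower x with
      | false => rfl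
      | true => exact absurd e h
    rw [flU_not_lower hx, flU_not_lower hx]

-- a separator is a fixed point of upperChar, and upperChar never moves a char
-- into or out of being a given separator
theorem flU_sep {c : Char} (h : flSep c = true) : flU c = c := by
  rcases flSep_cases h with rfl | rfl | rfl <;> decide

theorem flU_beq_sep {c : Char} (h : flSep c = true) (x : Char) :
    (flU x == c) = (x == c) := by
  by_cases hl : PySem.Chars.islower x = true
  · obtain ⟨he, h1, h2⟩ := flU_lower hl
    have hx : (x == c) = false := by
      cases e : x == c
      · rfl
      · exact absurd (congrArg Char.toNat (beq_iff_eq.mp e))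
          (by rcases flSep_toNat h with hc | hc | hc <;> rw [hc] <;> omega)
    rw [hx, he]
    rcases flSep_cases h with rfl | rfl | rfl <;>
      · obtain ⟨n, hn1, hn2, hne⟩ : ∃ n, 65 ≤ n ∧ n ≤ 90 ∧ x.toNat - 32 = n :=
          ⟨x.toNat - 32, by omega, by omega, rfl⟩
        rw [hne]
        interval_cases n <;> decide
  · have hx : PySem.Chars.islower x = false := by
      cases e : PySem.Chars.islower x with
      | false => rfl
      | true => exact absurd e hl
    rw [flU_not_lower hx]

theorem flSep_flU (c : Char) : flSep (flU c) = flSep c := by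
  unfold flSep
  rw [flU_beq_sep (c := ' ') (by decide), flU_beq_sep (c := '!') (by decide),
      flU_beq_sep (c := '-') (by decide)]

---------------------------------------------------------------------------
-- A-side: the mutating loop equals the combined look-behind pass flTall
---------------------------------------------------------------------------

theorem fl_capAfter_congr {a b : Char} (h : flSep a = flSep b) (cur : Char) :
    fl_capAfter a cur = fl_capAfter b cur := by
  unfold fl_capAfter
  rw [h]

theorem zipWith_capAfter_head {a b : Char} (h : flSep a = flSep b)
    (t u : List Char) :
    List.zipWith fl_capAfter (a :: t) u = List.zipWith fl_capAfter (b :: t) u := by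
  cases u with
  | nil => rfl
  | cons v vs => simp only [List.zipWith_cons_cons, fl_capAfter_congr h]

-- a recursive presentation of the combined look-behind pass
def flProcB : List Char → List Char
  | [] => []
  | [a] => [a]
  | a :: b :: t => a :: flProcB (fl_capAfter a b :: t)
termination_by l => l.length

theorem flSep_capAfter (a b : Char) : flSep (fl_capAfter a b) = flSep b := by
  unfold fl_capAfter
  split
  · exact flSep_flU b
  · rfl

theorem flProcB_eq_zip : ∀ (t : List Char) (a : Char),
    flProcB (a :: t) = a :: List.zipWith fl_capAfter (a :: t) t := by
  intro t
  induction t with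
  | nil => intro a; simp [flProcB]
  | cons b t' ih =>
    intro a
    rw [flProcB, ih (fl_capAfter a b)]
    rw [zipWith_capAfter_head (flSep_capAfter a b) t' t']
    rfl

theorem set_append_cons (pre : List Char) (a u : Char) (s : List Char) :
    (pre ++ a :: s).set (pre.length + 1) u = pre ++ a :: s.set 0 u := by
  induction pre with
  | nil => rfl
  | cons p ps ih =>
    simp only [List.cons_append, List.length_cons, List.set_cons_succ, ih]

theorem getElem_append_len (pre : List Char) (a : Char) (s : List Char)
    (h : pre.length < (pre ++ a :: s).length) :
    (pre ++ a :: s)[pre.length] = a := by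
  rw [List.getElem_append_right (Nat.le_refl _)]
  simp

theorem getElem_append_len1 (pre : List Char) (a b : Char) (s : List Char)
    (h : pre.length + 1 < (pre ++ a :: b :: s).length) :
    (pre ++ a :: b :: s)[pre.length + 1] = b := by
  rw [List.getElem_append_right (by omega)]
  simp

-- the loop of A, started at position pre.length with forcount = pre.length,
-- leaves pre alone and performs the look-behind pass on the suffix
theorem fl_loopA_eq_procB (n : Nat) : ∀ (suf pre : List Char), suf.length = n →
    fl_loopA (pre ++ suf) pre.length pre.length = pre ++ flProcB suf := by
  induction n with
  | zero =>
    intro suf pre h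
    have hs : suf = [] := List.eq_nil_of_length_eq_zero h
    subst hs
    rw [fl_loopA]
    simp [flProcB]
  | succ n ih =>
    intro suf pre h
    match suf with
    | [a] =>
      rw [fl_loopA]
      have hlt : pre.length < (pre ++ [a]).length := by simp
      rw [dif_pos hlt, getElem_append_len pre a [] hlt]
      by_cases hsep : (a == ' ' || a == '!' || a == '-') = true
      · rw [if_pos hsep]
        have hnlt : ¬ (pre.length + 1 < (pre ++ [a]).length) := by simp
        rw [dif_neg hnlt, fl_loopA, dif_neg (by simp)]
        simp [flProcB]
      · rw [if_neg hsep, fl_loopA, dif_neg (by simp)]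
        simp [flProcB]
    | a :: b :: t =>
      rw [fl_loopA]
      have hlt : pre.length < (pre ++ a :: b :: t).length := by simp
      rw [dif_pos hlt, getElem_append_len pre a (b :: t) hlt]
      have hlt1 : pre.length + 1 < (pre ++ a :: b :: t).length := by simp
      by_cases hsep : (a == ' ' || a == '!' || a == '-') = true
      · rw [if_pos hsep, dif_pos hlt1, getElem_append_len1 pre a b t hlt1,
            set_append_cons pre a (PySem.Chars.upperChar b) (b :: t)]
        have hre : pre ++ a :: (b :: t).set 0 (PySem.Chars.upperChar b)
            = (pre ++ [a]) ++ (PySem.Chars.upperChar b :: t) := by simp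
        have hlen : (pre ++ [a]).length = pre.length + 1 := by simp
        rw [hre, ← hlen,
            ih (PySem.Chars.upperChar b :: t) (pre ++ [a]) (by simp at h ⊢; omega)]
        have hcap : fl_capAfter a b = PySem.Chars.upperChar b := by
          unfold fl_capAfter flU; rw [if_pos (by unfold flSep; exact hsep)]
        rw [flProcB, hcap]
        simp
      · rw [if_neg hsep]
        have hre : pre ++ a :: b :: t = (pre ++ [a]) ++ (b :: t) := by simp
        have hlen : (pre ++ [a]).length = pre.length + 1 := by simp
        rw [hre, ← hlen, ih (b :: t) (pre ++ [a]) (by simp at h ⊢; omega)]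
        have hcap : fl_capAfter a b = b := by
          unfold fl_capAfter; rw [if_neg (by unfold flSep; exact hsep)]
        rw [flProcB, hcap]
        simp

-- A on a nonempty string is flCap1 of the combined look-behind pass
theorem portA_eq_cap_tall (c : Char) (rest : List Char) :
    fl_loopA (PySem.Chars.upperChar c :: rest) 0 0 = flCap1 (flTall (c :: rest)) := by
  have hA := fl_loopA_eq_procB (PySem.Chars.upperChar c :: rest).length
    (PySem.Chars.upperChar c :: rest) [] rfl
  simp only [List.nil_append, List.length_nil] at hA
  rw [hA, flProcB_eq_zip rest (PySem.Chars.upperChar c)]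
  show flU c :: List.zipWith fl_capAfter (flU c :: rest) rest = flCap1 (flTall (c :: rest))
  rw [zipWith_capAfter_head (flSep_flU c) rest rest]
  rfl

---------------------------------------------------------------------------
-- B-side: each split/cap/join stage equals flCap1 ∘ (single-sep pass flTz)
---------------------------------------------------------------------------

theorem flSplit1_ne_nil (c : Char) (l : List Char) : flSplit1 c l ≠ [] := by
  cases l with
  | nil => simp [flSplit1]
  | cons a t =>
    unfold flSplit1
    cases flSplit1 c t with
    | nil => simp
    | cons p ps =>
      by_cases h : (a == c) = true <;> simp [h]

theorem flJoin1_cons_head (c a : Char) (p : List Char) (rest : List (List Char)) :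
    flJoin1 c ((a :: p) :: rest) = a :: flJoin1 c (p :: rest) := by
  cases rest <;> rfl

theorem flJoin1_cap_head {c : Char} (hc : flU c = c) (p : List Char)
    (rest : List (List Char)) :
    flJoin1 c (flCap1 p :: rest) = flCap1 (flJoin1 c (p :: rest)) := by
  cases rest with
  | nil => rfl
  | cons q r =>
    cases p with
    | nil =>
      show flJoin1 c ([] :: q :: r) = flCap1 (flJoin1 c ([] :: q :: r))
      show c :: flJoin1 c (q :: r) = flCap1 (c :: flJoin1 c (q :: r))
      show c :: flJoin1 c (q :: r) = flU c :: flJoin1 c (q :: r)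
      rw [hc]
    | cons x t =>
      show (flU x :: t) ++ c :: flJoin1 c (q :: r)
          = flCap1 ((x :: t) ++ c :: flJoin1 c (q :: r))
      rfl

-- the tail version of a stage: head piece kept raw, later pieces capitalized
def flStageTail (c : Char) (l : List Char) : List Char :=
  match flSplit1 c l with
  | [] => []   -- unreachable
  | p :: ps => flJoin1 c (p :: ps.map flCap1)

theorem flStage_eq_cap_stageTail {c : Char} (hc : flU c = c) (l : List Char) :
    flStage c l = flCap1 (flStageTail c l) := by
  unfold flStage flStageTail
  cases hs : flSplit1 c l with
  | nil => exact absurd hs (flSplit1_ne_nil c l)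
  | cons p ps =>
    show flJoin1 c (flCap1 p :: ps.map flCap1) = flCap1 (flJoin1 c (p :: ps.map flCap1))
    exact flJoin1_cap_head hc p _

-- recursive single-sep look-behind pass
def flTp (c : Char) : List Char → List Char
  | [] => []
  | [a] => [a]
  | a :: b :: t => a :: flTp c ((if a == c then flU b else b) :: t)
termination_by l => l.length

theorem flTp_sep_cons {c : Char} (hsep : flSep c = true) (t : List Char) :
    flTp c (c :: t) = c :: flCap1 (flTp c t) := by
  cases t with
  | nil => simp [flTp, flCap1]
  | cons b u =>
    cases u with
    | nil => simp [flTp, flCap1, flU]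
    | cons v w =>
      have e1 : flTp c (c :: b :: v :: w) = c :: flTp c (flU b :: v :: w) := by
        rw [flTp]; simp
      have e2 : flTp c (flU b :: v :: w)
          = flU b :: flTp c ((if flU b == c then flU v else v) :: w) := by
        rw [flTp]
      have e3 : flTp c (b :: v :: w)
          = b :: flTp c ((if b == c then flU v else v) :: w) := by
        rw [flTp]
      rw [e1, e2, e3, flU_beq_sep hsep b]
      rfl

theorem flTp_nonsep_cons {c a : Char} (ha : (a == c) = false) (t : List Char) :
    flTp c (a :: t) = a :: flTp c t := by
  cases t with
  | nil => simp [flTp]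
  | cons b u => rw [flTp]; simp [ha]

theorem flStageTail_eq_flTp {c : Char} (hsep : flSep c = true) (l : List Char) :
    flStageTail c l = flTp c l := by
  induction l with
  | nil => simp [flStageTail, flSplit1, flJoin1, flTp]
  | cons a t ih =>
    cases hs : flSplit1 c t with
    | nil => exact absurd hs (flSplit1_ne_nil c t)
    | cons p ps =>
      have hst : flStageTail c t = flJoin1 c (p :: ps.map flCap1) := by
        unfold flStageTail; rw [hs]
      have hsplit : flSplit1 c (a :: t)
          = if a == c then [] :: p :: ps else (a :: p) :: ps := by
        rw [flSplit1, hs]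
      unfold flStageTail
      rw [hsplit]
      by_cases ha : (a == c) = true
      · rw [if_pos ha]
        show flJoin1 c ([] :: flCap1 p :: ps.map flCap1) = flTp c (a :: t)
        have hj : flJoin1 c ([] :: flCap1 p :: ps.map flCap1)
            = c :: flJoin1 c (flCap1 p :: ps.map flCap1) := rfl
        rw [hj, flJoin1_cap_head (flU_sep hsep), ← hst, ih]
        obtain rfl : a = c := beq_iff_eq.mp ha
        rw [flTp_sep_cons hsep]
      · rw [if_neg ha]
        show flJoin1 c ((a :: p) :: ps.map flCap1) = flTp c (a :: t)
        have ha' : (a == c) = false := by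
          cases e : (a == c) with
          | false => rfl
          | true => exact absurd e ha
        rw [flJoin1_cons_head, ← hst, ih, flTp_nonsep_cons ha']


-- flTp equals the zip form flTz
theorem flG_congr {c y b : Char} (h : (y == c) = (b == c)) (cur : Char) :
    flG c y cur = flG c b cur := by
  unfold flG; rw [h]

theorem zipWith_flG_head {c y b : Char} (h : (y == c) = (b == c)) (t u : List Char) :
    List.zipWith (flG c) (y :: t) u = List.zipWith (flG c) (b :: t) u := by
  cases u with
  | nil => rfl
  | cons v vs => simp only [List.zipWith_cons_cons, flG_congr h]

theorem flTp_eq_flTz {c : Char} (hsep : flSep c = true) :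
    ∀ (t : List Char) (a : Char),
    flTp c (a :: t) = a :: List.zipWith (flG c) (a :: t) t := by
  intro t
  induction t with
  | nil => intro a; simp [flTp]
  | cons b t' ih =>
    intro a
    rw [flTp]
    have hg : (if a == c then flU b else b) = flG c a b := rfl
    rw [hg, ih (flG c a b)]
    have hy : (flG c a b == c) = (b == c) := by
      unfold flG
      split
      · exact flU_beq_sep hsep b
      · rfl
    rw [zipWith_flG_head hy t' t']
    rfl

theorem flStage_eq_cap_Tz {c : Char} (hsep : flSep c = true) (l : List Char) :
    flStage c l = flCap1 (flTz c l) := by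
  rw [flStage_eq_cap_stageTail (flU_sep hsep), flStageTail_eq_flTp hsep]
  cases l with
  | nil => simp [flTp, flTz]
  | cons a t => rw [flTp_eq_flTz hsep t a]; rfl

---------------------------------------------------------------------------
-- composing the three single-sep passes gives the combined pass
---------------------------------------------------------------------------

theorem flCap1_idem (l : List Char) : flCap1 (flCap1 l) = flCap1 l := by
  cases l with
  | nil => rfl
  | cons a t => show flU (flU a) :: t = flU a :: t; rw [flU_idem]

theorem flTz_cap1 {c : Char} (hsep : flSep c = true) (l : List Char) :
    flTz c (flCap1 l) = flCap1 (flTz c l) := by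
  cases l with
  | nil => rfl
  | cons h t =>
    show flU h :: List.zipWith (flG c) (flU h :: t) t
        = flU h :: List.zipWith (flG c) (h :: t) t
    rw [zipWith_flG_head (flU_beq_sep hsep h) t t]

theorem flTz_length (c : Char) (l : List Char) : (flTz c l).length = l.length := by
  cases l with
  | nil => rfl
  | cons h t => simp [flTz]

theorem flTz_getElem_zero (c : Char) (l : List Char) (h : 0 < (flTz c l).length) :
    (flTz c l)[0] = l[0]'(by rw [← flTz_length c l]; exact h) := by
  cases l with
  | nil => simp [flTz] at h
  | cons a t => rfl

theorem flTz_getElem_succ (c : Char) (l : List Char) (j : Nat)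
    (h : j + 1 < (flTz c l).length) :
    (flTz c l)[j + 1]
      = flG c (l[j]'(by rw [← flTz_length c l]; omega))
              (l[j + 1]'(by rw [← flTz_length c l]; exact h)) := by
  cases l with
  | nil => simp [flTz] at h
  | cons a t =>
    have h' : j + 1 < (a :: t).length := by rw [← flTz_length c (a :: t)]; exact h
    show (a :: List.zipWith (flG c) (a :: t) t)[j + 1] = _
    rw [List.getElem_cons_succ, List.getElem_zipWith]
    rfl

theorem flTz_shape (c : Char) (l : List Char) (j : Nat) (h : j < (flTz c l).length) :
    (flTz c l)[j] = l[j]'(by rw [← flTz_length c l]; exact h)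
      ∨ (flTz c l)[j] = flU (l[j]'(by rw [← flTz_length c l]; exact h)) := by
  cases j with
  | zero => left; exact flTz_getElem_zero c l h
  | succ j =>
    rw [flTz_getElem_succ c l j h]
    unfold flG
    split
    · right; rfl
    · left; rfl

theorem beq_transfer {c y x : Char} (hsep : flSep c = true)
    (h : y = x ∨ y = flU x) : (y == c) = (x == c) := by
  rcases h with rfl | rfl
  · rfl
  · exact flU_beq_sep hsep x

theorem flTall_length (l : List Char) : (flTall l).length = l.length := by
  cases l with
  | nil => rfl
  | cons h t => simp [flTall]

theorem flTall_getElem_zero (l : List Char) (h : 0 < (flTall l).length) :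
    (flTall l)[0] = l[0]'(by rw [← flTall_length l]; exact h) := by
  cases l with
  | nil => simp [flTall] at h
  | cons a t => rfl

theorem flTall_getElem_succ (l : List Char) (j : Nat) (h : j + 1 < (flTall l).length) :
    (flTall l)[j + 1]
      = fl_capAfter (l[j]'(by rw [← flTall_length l]; omega))
                    (l[j + 1]'(by rw [← flTall_length l]; exact h)) := by
  cases l with
  | nil => simp [flTall] at h
  | cons a t =>
    show (a :: List.zipWith fl_capAfter (a :: t) t)[j + 1] = _
    rw [List.getElem_cons_succ, List.getElem_zipWith]
    rfl

theorem flTz_comp (l : List Char) :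
    flTz '-' (flTz '!' (flTz ' ' l)) = flTall l := by
  apply List.ext_getElem
  · rw [flTz_length, flTz_length, flTz_length, flTall_length]
  intro i h1 h2
  rw [flTz_length] at h1
  have hl2 : i < (flTz '!' (flTz ' ' l)).length := h1
  rw [flTz_length] at h1
  have hl1 : i < (flTz ' ' l).length := h1
  rw [flTz_length] at h1
  have hl0 : i < l.length := h1
  cases i with
  | zero =>
    rw [flTz_getElem_zero, flTz_getElem_zero, flTz_getElem_zero, flTall_getElem_zero]
  | succ j =>
    have hj0 : j < l.length := by omega
    have hj1 : j < (flTz ' ' l).length := by rw [flTz_length]; exact hj0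
    have hj2 : j < (flTz '!' (flTz ' ' l)).length := by rw [flTz_length]; exact hj1
    rw [flTz_getElem_succ, flTz_getElem_succ, flTz_getElem_succ, flTall_getElem_succ]
    have hs1 := flTz_shape ' ' l j hj1
    have hs2 := flTz_shape '!' (flTz ' ' l) j hj2
    have hshape : (flTz '!' (flTz ' ' l))[j]'hj2 = l[j]'hj0
        ∨ (flTz '!' (flTz ' ' l))[j]'hj2 = flU (l[j]'hj0) := by
      rcases hs2 with h2e | h2e <;> rcases hs1 with h1e | h1e <;>
        rw [h2e, h1e] <;> simp [flU_idem]
    have hb2 : ((flTz '!' (flTz ' ' l))[j]'hj2 == '-') = (l[j]'hj0 == '-') :=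
      beq_transfer (by decide) hshape
    have hb1 : ((flTz ' ' l)[j]'hj1 == '!') = (l[j]'hj0 == '!') :=
      beq_transfer (by decide) hs1
    unfold flG fl_capAfter flSep
    rw [hb2, hb1]
    by_cases e1 : (l[j]'hj0 == ' ') = true <;>
      by_cases e2 : (l[j]'hj0 == '!') = true <;>
        by_cases e3 : (l[j]'hj0 == '-') = true <;>
          simp [e1, e2, e3, flU_idem]

---------------------------------------------------------------------------
-- putting it together
---------------------------------------------------------------------------

theorem portB_eq_cap_tall (l : List Char) :
    [' ', '!', '-'].foldl (fun s sep => flStage sep s) l = flCap1 (flTall l) := by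
  show flStage '-' (flStage '!' (flStage ' ' l)) = flCap1 (flTall l)
  rw [flStage_eq_cap_Tz (c := '-') (by decide), flStage_eq_cap_Tz (c := '!') (by decide),
      flStage_eq_cap_Tz (c := ' ') (by decide), flTz_cap1 (c := '!') (by decide),
      flCap1_idem, flTz_cap1 (c := '-') (by decide), flCap1_idem, flTz_comp]

-- ===== VERDICT (by name: the statement is the Claim_ definition above) =====
theorem first_letter_capital_spec : Claim_equal_first_letter_capital := by
  intro s _hdom hpre
  unfold Spec_first_letter_capital first_letter_capital first_letter_capital_alt
  cases h : s.toList with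
  | nil => exact absurd (String.toList_eq_nil_iff.mp h) hpre
  | cons c rest =>
    show String.ofList (fl_loopA (PySem.Chars.upperChar c :: rest) 0 0)
        = String.ofList ([' ', '!', '-'].foldl (fun s sep => flStage sep s) (c :: rest))
    rw [portA_eq_cap_tall, portB_eq_cap_tall]
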